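-- pv_equiv track=rewrite | github.com/kevinjardine/gaiadr2 | dr2_make_mesh_sets.py | prune
-- ===== SOURCE A (Python) =====
-- def prune(r,d,a,b):
--     d1,r1 = r.split('-')
--     if d1 == d:
--         b.append(r)
--     elif r in a:
--         for r2 in a[r]:
--             b = prune(r2,d,a,b)
--     return b
-- ===== SOURCE B (Python) =====
-- def prune(r, d, a, b):
--     # iterative DFS with an explicit stack instead of recursion; appends to b in place like A
--     stack = [r]
--     while stack:
--         node = stack.pop()
--         d1, r1 = node.split('-')
--         if d1 == d:
--             b.append(node)
--         elif node in a:
--             stack.extend(reversed(a[node]))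
--     return b
-- ===== Notes on version B (the rewrite author's own statement) =====
-- stated objective: alternative
-- what changed: The recursive accumulator-passing DFS is replaced by an iterative loop over an explicit stack (children pushed in reverse so preorder append order is preserved); b is still mutated in place and returned.
import Mathlib
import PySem

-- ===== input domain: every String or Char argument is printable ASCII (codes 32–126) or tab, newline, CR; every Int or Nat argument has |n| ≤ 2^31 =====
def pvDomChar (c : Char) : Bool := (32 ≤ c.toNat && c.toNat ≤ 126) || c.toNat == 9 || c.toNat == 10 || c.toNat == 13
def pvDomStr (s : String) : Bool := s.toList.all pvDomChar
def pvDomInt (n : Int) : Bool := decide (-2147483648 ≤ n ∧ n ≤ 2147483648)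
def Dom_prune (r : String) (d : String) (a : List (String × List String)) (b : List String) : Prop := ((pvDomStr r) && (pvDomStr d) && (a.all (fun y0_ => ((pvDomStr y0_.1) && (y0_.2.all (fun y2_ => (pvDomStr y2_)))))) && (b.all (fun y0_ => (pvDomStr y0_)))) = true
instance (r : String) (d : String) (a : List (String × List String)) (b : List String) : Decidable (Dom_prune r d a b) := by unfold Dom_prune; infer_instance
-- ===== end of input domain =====

-- B replaces A's recursive DFS by an explicit-stack loop (same preorder, same in-place append
-- to b — the proved equivalence is about the returned list; both Pythons mutate b identically).
-- Both ports carry a fuel guard only to make the (possibly cyclic, hence diverging) traversal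
-- total in Lean; inside Pre_ the fuel never runs out.

-- ===== PORT A =====
-- recursive DFS of A, fuel-guarded (none = fuel exhausted, or ValueError from a bad split)
def pruneA (d : String) (a : List (String × List String)) : Nat → String → List String → Option (List String)
  | 0, _, _ => none
  | f+1, r, b =>
    match PySem.Str.split? r "-" with
    | some [d1, _r1] =>
      if d1 == d then some (b ++ [r])
      else if (PySem.Dict.mk a).contains r then
        ((PySem.Dict.mk a).getD r []).foldlM (fun b r2 => pruneA d a f r2 b) b
      else some b
    | _ => none

-- fuel that the totality proof shows sufficient on Pre_: DFS depth is bounded by the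
-- number of distinct reachable nodes, which the universe r :: all-children bounds
def fuelA (a : List (String × List String)) : Nat := (a.flatMap Prod.snd).length + 2

def prune (r : String) (d : String) (a : List (String × List String)) (b : List String) : List String :=
  (pruneA d a (fuelA a) r b).getD b

-- ===== PORT B =====
-- Python's stack pops from the END; the Lean list models the stack head-first, so
-- stack.extend(reversed(a[node])) followed by stack.pop() becomes children ++ stack, pop the head.
def pruneB (d : String) (a : List (String × List String)) : Nat → List String → List String → Option (List String)
  | 0, _, _ => none
  | _+1, [], b => some b
  | f+1, node :: stack, b =>
    match PySem.Str.split? node "-" with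
    | some [d1, _r1] =>
      if d1 == d then pruneB d a f stack (b ++ [node])
      else if (PySem.Dict.mk a).contains node then
        pruneB d a f (((PySem.Dict.mk a).getD node []) ++ stack) b
      else pruneB d a f stack b
    | _ => none

-- fuel bound for the loop: enough iterations for any DFS of depth ≤ f with branching ≤ m
def bCost (m : Nat) : Nat → Nat
  | 0 => 0
  | f+1 => 1 + m * bCost m f

def maxChildren (a : List (String × List String)) : Nat :=
  a.foldl (fun m p => max m p.2.length) 0

def prune_alt (r : String) (d : String) (a : List (String × List String)) (b : List String) : List String :=
  (pruneB d a (bCost (maxChildren a) (fuelA a) + 1) [r] b).getD b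

-- ===== PRECONDITION & SPEC =====
-- 'node splits into exactly two pieces', i.e. the node contains exactly one '-'
def OneDash (s : String) : Prop := ((PySem.Str.split? s "-").getD []).length = 2

-- A descends into x exactly when x splits in two, its first piece is not d, and x is a key
def expandable (d : String) (a : List (String × List String)) (x : String) : Bool :=
  match PySem.Str.split? x "-" with
  | some [d1, _r1] => (d1 != d) && (PySem.Dict.mk a).contains x
  | _ => false

def kids (a : List (String × List String)) (x : String) : List String :=
  (PySem.Dict.mk a).getD x []

-- add the members of cs not yet present (keeps the accumulator duplicate-free)
def addNew (T : List String) (cs : List String) : List String :=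
  cs.foldl (fun T c => if c ∈ T then T else T ++ [c]) T

-- one closure step: add every child of every expandable member
def stepf (d : String) (a : List (String × List String)) (S : List String) : List String :=
  S.foldl (fun T x => if expandable d a x then addNew T (kids a x) else T) S

-- iterate to a fixpoint (the fuel is spent only while the set strictly grows)
def closureAux (d : String) (a : List (String × List String)) : Nat → List String → List String
  | 0, S => S
  | n+1, S => if stepf d a S = S then S else closureAux d a n (stepf d a S)

-- all nodes the DFS can reach from x
def cloN (d : String) (a : List (String × List String)) (x : String) : List String :=
  closureAux d a (fuelA a) [x]

-- Pre_ holds exactly when the Python A RETURNS: it fails only where A raises — a reachable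
-- node that does not split into exactly two pieces (ValueError from the unpack), or a node
-- reachable from r that can reach itself again (infinite recursion, RecursionError).
def Pre_prune (r : String) (d : String) (a : List (String × List String)) (b : List String) : Prop :=
  (∀ x ∈ cloN d a r, OneDash x) ∧
  (∀ x ∈ cloN d a r, expandable d a x = true → ∀ c ∈ kids a x, x ∉ cloN d a c)

instance (r : String) (d : String) (a : List (String × List String)) (b : List String) : Decidable (Pre_prune r d a b) := by
  unfold Pre_prune; unfold OneDash; infer_instance

def pvWitness_prune : String × String × (List (String × List String)) × List String :=
  ("a-1", "c", [("a-1", ["b-2", "c-3"]), ("b-2", ["c-4"])], ["z-9"])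

def Spec_prune (r : String) (d : String) (a : List (String × List String)) (b : List String) (out : List String) : Prop := out = prune_alt r d a b
instance (r : String) (d : String) (a : List (String × List String)) (b : List String) (out : List String) : Decidable (Spec_prune r d a b out) := by unfold Spec_prune; infer_instance

-- ===== CLAIM (what is proved, stated in full; the proofs are below) =====
def Claim_equal_prune : Prop := ∀ (r : String) (d : String) (a : List (String × List String)) (b : List String), Dom_prune r d a b → Pre_prune r d a b → Spec_prune r d a b (prune r d a b)

-- ===== LEMMAS AND PROOFS =====

-- fuel monotonicity for the stack loop
theorem pruneB_mono (d : String) (a : List (String × List String)) :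
    ∀ f g s b v, f ≤ g → pruneB d a f s b = some v → pruneB d a g s b = some v := by
  intro f
  induction f with
  | zero => intro g s b v _ h; simp [pruneB] at h
  | succ f ih =>
    intro g s b v hle h
    obtain ⟨g', rfl⟩ : ∃ g', g = g' + 1 := ⟨g - 1, by omega⟩
    cases s with
    | nil => simpa [pruneB] using h
    | cons node stack =>
      simp only [pruneB] at h ⊢
      cases hsp : PySem.Str.split? node "-" with
      | none => rw [hsp] at h; simp at h
      | some l =>
        rw [hsp] at h
        match l with
        | [] => simp at h
        | [x] => simp at h
        | x :: y :: z :: t => simp at h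
        | [d1, r1] =>
          simp only at h ⊢
          split_ifs at h ⊢ <;> exact ih g' _ _ _ (by omega) h

-- a foldl of max never goes below its start
theorem le_foldl_maxChildren (t : List (String × List String)) (x : Nat) :
    x ≤ t.foldl (fun m p => max m p.2.length) x := by
  induction t generalizing x with
  | nil => simp
  | cons q t ih => exact le_trans (le_max_left _ _) (ih _)

theorem foldl_max_le (a : List (String × List String)) :
    ∀ (init : Nat), ∀ p ∈ a, p.2.length ≤ a.foldl (fun m p => max m p.2.length) init := by
  induction a with
  | nil => intro _ p hp; simp at hp
  | cons q t ih =>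
    intro init p hp
    rcases List.mem_cons.mp hp with rfl | hp
    · simp only [List.foldl_cons]
      calc p.2.length ≤ max init p.2.length := le_max_right _ _
        _ ≤ t.foldl (fun m p => max m p.2.length) (max init p.2.length) := le_foldl_maxChildren t _
    · exact ih _ p hp

-- each dict value is at most maxChildren long
theorem length_le_maxChildren (a : List (String × List String)) (p : String × List String)
    (hp : p ∈ a) : p.2.length ≤ maxChildren a := foldl_max_le a 0 p hp

-- a successful lookup returns the value at the first index whose key matches
theorem get?_mk_eq (a : List (String × List String)) (r : String) (v : List String)
    (h : (PySem.Dict.mk a).get? r = some v) :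
    ∃ i, ∃ (hi : i < a.length), a[i].1 = r ∧ a[i].2 = v := by
  induction a with
  | nil => simp [PySem.Dict.get?] at h
  | cons q t ih =>
    rw [show (PySem.Dict.mk (q :: t)) = { items := q :: t } from rfl] at h
    obtain ⟨k, w⟩ := q
    rw [PySem.Dict.get?_mk_cons] at h
    by_cases hk : k = r
    · subst hk
      simp at h
      exact ⟨0, by simp, rfl, by simpa using h⟩
    · rw [if_neg (by simpa using hk)] at h
      obtain ⟨i, hi, h1, h2⟩ := ih h
      exact ⟨i + 1, by simpa using hi, by simpa using h1, by simpa using h2⟩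

-- kids is either a value stored in a, or []
theorem kids_subset_flatMap (a : List (String × List String)) (x : String) :
    ∀ c ∈ kids a x, c ∈ a.flatMap Prod.snd := by
  intro c hc
  unfold kids at hc
  cases hv : (PySem.Dict.mk a).get? x with
  | none => rw [PySem.Dict.getD_of_get?_eq_none _ _ hv] at hc; simp at hc
  | some v =>
    rw [PySem.Dict.getD_of_get?_eq_some _ _ hv] at hc
    obtain ⟨i, hi, _, h2⟩ := get?_mk_eq a x v hv
    exact List.mem_flatMap.mpr ⟨a[i], List.getElem_mem hi, by rw [h2]; exact hc⟩

theorem kids_length_le (a : List (String × List String)) (x : String) :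
    (kids a x).length ≤ maxChildren a := by
  unfold kids
  cases hv : (PySem.Dict.mk a).get? x with
  | none => rw [PySem.Dict.getD_of_get?_eq_none _ _ hv]; simp
  | some v =>
    rw [PySem.Dict.getD_of_get?_eq_some _ _ hv]
    obtain ⟨i, hi, _, h2⟩ := get?_mk_eq a x v hv
    have := length_le_maxChildren a a[i] (List.getElem_mem hi)
    rw [h2] at this; exact this

-- ---- addNew: prefix, membership, nodup ----
theorem addNew_prefix (cs : List String) : ∀ T, T <+: addNew T cs := by
  induction cs with
  | nil => intro T; exact List.prefix_rfl
  | cons c cs ih =>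
    intro T
    unfold addNew
    rw [List.foldl_cons]
    by_cases h : c ∈ T
    · rw [if_pos h]; exact ih T
    · rw [if_neg h]
      exact List.IsPrefix.trans (List.prefix_append T [c]) (ih (T ++ [c]))

theorem mem_addNew (cs : List String) : ∀ T x, x ∈ addNew T cs ↔ x ∈ T ∨ x ∈ cs := by
  induction cs with
  | nil => intro T x; simp [addNew]
  | cons c cs ih =>
    intro T x
    unfold addNew
    rw [List.foldl_cons]
    by_cases h : c ∈ T
    · rw [if_pos h]
      rw [show (List.foldl (fun T c => if c ∈ T then T else T ++ [c]) T cs = addNew T cs) from rfl, ih]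
      constructor
      · rintro (hx | hx)
        · exact Or.inl hx
        · exact Or.inr (List.mem_cons_of_mem _ hx)
      · rintro (hx | hx)
        · exact Or.inl hx
        · rcases List.mem_cons.mp hx with rfl | hx
          · exact Or.inl h
          · exact Or.inr hx
    · rw [if_neg h]
      rw [show (List.foldl (fun T c => if c ∈ T then T else T ++ [c]) (T ++ [c]) cs = addNew (T ++ [c]) cs) from rfl, ih]
      simp only [List.mem_append, List.mem_cons]
      tauto

theorem addNew_nodup (cs : List String) : ∀ T, T.Nodup → (addNew T cs).Nodup := by
  induction cs with
  | nil => intro T h; exact h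
  | cons c cs ih =>
    intro T h
    unfold addNew
    rw [List.foldl_cons]
    by_cases hc : c ∈ T
    · rw [if_pos hc]; exact ih T h
    · rw [if_neg hc]
      refine ih (T ++ [c]) ?_
      have hx : ∀ x ∈ T, ¬x = c := fun x hx hxc => hc (hxc ▸ hx)
      simp only [List.nodup_append, List.nodup_cons, List.not_mem_nil, not_false_eq_true,
        List.nodup_nil, and_true, true_and, h]
      simpa using hx

-- ---- stepf: prefix, nodup, closure under a closed superset, fixpoint means closed ----
theorem foldl_step_prefix (d : String) (a : List (String × List String)) (l : List String) :
    ∀ T, T <+: l.foldl (fun T x => if expandable d a x then addNew T (kids a x) else T) T := by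
  induction l with
  | nil => intro T; exact List.prefix_rfl
  | cons y l ih =>
    intro T
    rw [List.foldl_cons]
    by_cases h : expandable d a y
    · rw [if_pos h]; exact List.IsPrefix.trans (addNew_prefix _ T) (ih _)
    · rw [if_neg h]; exact ih T

theorem subset_stepf (d : String) (a : List (String × List String)) (S : List String) :
    S <+: stepf d a S := foldl_step_prefix d a S S

theorem foldl_step_nodup (d : String) (a : List (String × List String)) :
    ∀ (l T : List String), T.Nodup →
      (l.foldl (fun T x => if expandable d a x then addNew T (kids a x) else T) T).Nodup := by
  intro l
  induction l with
  | nil => intro T h; exact h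
  | cons y l ih =>
    intro T h
    rw [List.foldl_cons]
    by_cases he : expandable d a y
    · rw [if_pos he]; exact ih _ (addNew_nodup (kids a y) T h)
    · rw [if_neg he]; exact ih _ h

theorem stepf_nodup (d : String) (a : List (String × List String)) (S : List String)
    (h : S.Nodup) : (stepf d a S).Nodup := foldl_step_nodup d a S S h

theorem mem_foldl_step (d : String) (a : List (String × List String)) :
    ∀ (l T : List String) (x : String),
      (x ∈ l.foldl (fun T x => if expandable d a x then addNew T (kids a x) else T) T ↔
        x ∈ T ∨ ∃ y ∈ l, expandable d a y = true ∧ x ∈ kids a y) := by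
  intro l
  induction l with
  | nil => intro T x; simp
  | cons y l ih =>
    intro T x
    rw [List.foldl_cons]
    by_cases he : expandable d a y
    · rw [if_pos he, ih, mem_addNew]
      constructor
      · rintro ((hx | hx) | ⟨z, hz, hez, hxz⟩)
        · exact Or.inl hx
        · exact Or.inr ⟨y, List.mem_cons_self, he, hx⟩
        · exact Or.inr ⟨z, List.mem_cons_of_mem _ hz, hez, hxz⟩
      · rintro (hx | ⟨z, hz, hez, hxz⟩)
        · exact Or.inl (Or.inl hx)
        · rcases List.mem_cons.mp hz with rfl | hz
          · exact Or.inl (Or.inr hxz)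
          · exact Or.inr ⟨z, hz, hez, hxz⟩
    · rw [if_neg he, ih]
      constructor
      · rintro (hx | ⟨z, hz, hez, hxz⟩)
        · exact Or.inl hx
        · exact Or.inr ⟨z, List.mem_cons_of_mem _ hz, hez, hxz⟩
      · rintro (hx | ⟨z, hz, hez, hxz⟩)
        · exact Or.inl hx
        · rcases List.mem_cons.mp hz with rfl | hz
          · exact absurd hez (by simp [he])
          · exact Or.inr ⟨z, hz, hez, hxz⟩

theorem mem_stepf (d : String) (a : List (String × List String)) (S : List String) (x : String) :
    x ∈ stepf d a S ↔ x ∈ S ∨ ∃ y ∈ S, expandable d a y = true ∧ x ∈ kids a y :=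
  mem_foldl_step d a S S x

-- if T contains S and is closed under expansion, one step stays inside T
theorem stepf_subset_closed (d : String) (a : List (String × List String)) (S T : List String)
    (hST : ∀ x ∈ S, x ∈ T) (hT : ∀ x ∈ T, expandable d a x = true → ∀ c ∈ kids a x, c ∈ T) :
    ∀ x ∈ stepf d a S, x ∈ T := by
  intro x hx
  rcases (mem_stepf d a S x).mp hx with hx | ⟨y, hy, hey, hxy⟩
  · exact hST x hx
  · exact hT y (hST y hy) hey x hxy

theorem stepf_eq_closed (d : String) (a : List (String × List String)) (S : List String)
    (h : stepf d a S = S) : ∀ x ∈ S, expandable d a x = true → ∀ c ∈ kids a x, c ∈ S := by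
  intro x hx he c hc
  have : c ∈ stepf d a S := (mem_stepf d a S c).mpr (Or.inr ⟨x, hx, he, hc⟩)
  rwa [h] at this

-- a duplicate-free list is no longer than any list containing its members
theorem nodup_length_le (l₁ l₂ : List String) (h : l₁.Nodup) (hs : ∀ x ∈ l₁, x ∈ l₂) :
    l₁.length ≤ l₂.length := (List.subperm_of_subset h hs).length_le

-- ---- closureAux: contains the start, nodup, least closed, fixpoint with enough fuel ----
theorem subset_closureAux (d : String) (a : List (String × List String)) :
    ∀ n S, S <+: closureAux d a n S := by
  intro n
  induction n with
  | zero => intro S; exact List.prefix_rfl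
  | succ n ih =>
    intro S
    unfold closureAux
    by_cases h : stepf d a S = S
    · rw [if_pos h]
    · rw [if_neg h]; exact List.IsPrefix.trans (subset_stepf d a S) (ih _)

theorem closureAux_nodup (d : String) (a : List (String × List String)) :
    ∀ n S, S.Nodup → (closureAux d a n S).Nodup := by
  intro n
  induction n with
  | zero => intro S h; exact h
  | succ n ih =>
    intro S h
    unfold closureAux
    by_cases hf : stepf d a S = S
    · rw [if_pos hf]; exact h
    · rw [if_neg hf]; exact ih _ (stepf_nodup d a S h)

theorem closureAux_least (d : String) (a : List (String × List String)) (T : List String)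
    (hT : ∀ x ∈ T, expandable d a x = true → ∀ c ∈ kids a x, c ∈ T) :
    ∀ n S, (∀ x ∈ S, x ∈ T) → ∀ x ∈ closureAux d a n S, x ∈ T := by
  intro n
  induction n with
  | zero => intro S h; exact h
  | succ n ih =>
    intro S h
    unfold closureAux
    by_cases hf : stepf d a S = S
    · rw [if_pos hf]; exact h
    · rw [if_neg hf]; exact ih _ (stepf_subset_closed d a S T h hT)

-- with fuel past the size of a containing closed universe V, the result is a fixpoint
theorem closureAux_fix (d : String) (a : List (String × List String)) (V : List String)
    (hV : ∀ x ∈ V, expandable d a x = true → ∀ c ∈ kids a x, c ∈ V) :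
    ∀ n S, S.Nodup → (∀ x ∈ S, x ∈ V) → V.length + 1 ≤ n + S.length →
      stepf d a (closureAux d a n S) = closureAux d a n S := by
  intro n
  induction n with
  | zero =>
    intro S hnd hSV hn
    have : S.length ≤ V.length := nodup_length_le S V hnd hSV
    omega
  | succ n ih =>
    intro S hnd hSV hn
    unfold closureAux
    by_cases hf : stepf d a S = S
    · rw [if_pos hf]; exact hf
    · rw [if_neg hf]
      have hpre := subset_stepf d a S
      have hlt : S.length < (stepf d a S).length := by
        rcases Nat.lt_or_ge S.length (stepf d a S).length with h | h
        · exact h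
        · exact absurd (List.IsPrefix.eq_of_length_le hpre h).symm hf
      exact ih _ (stepf_nodup d a S hnd) (stepf_subset_closed d a S V hSV hV) (by omega)

-- ---- cloN: the reachable set from one node ----
theorem mem_cloN_self (d : String) (a : List (String × List String)) (x : String) :
    x ∈ cloN d a x :=
  (subset_closureAux d a _ [x]).subset (by simp)

theorem cloN_nodup (d : String) (a : List (String × List String)) (x : String) :
    (cloN d a x).Nodup := closureAux_nodup d a _ [x] (by simp)

-- the universe x :: all-children is closed, so cloN is a fixpoint and hence closed
theorem cloN_closed (d : String) (a : List (String × List String)) (x : String) :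
    ∀ y ∈ cloN d a x, expandable d a y = true → ∀ c ∈ kids a y, c ∈ cloN d a x := by
  apply stepf_eq_closed
  apply closureAux_fix d a (x :: a.flatMap Prod.snd)
  · intro y _ _ c hc
    exact List.mem_cons_of_mem _ (kids_subset_flatMap a y c hc)
  · simp
  · simp
  · simp [fuelA]

theorem cloN_least (d : String) (a : List (String × List String)) (x : String) (T : List String)
    (hT : ∀ y ∈ T, expandable d a y = true → ∀ c ∈ kids a y, c ∈ T) (hx : x ∈ T) :
    ∀ y ∈ cloN d a x, y ∈ T :=
  closureAux_least d a T hT _ [x] (by simpa using hx)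

-- a child's reachable set sits inside the parent's
theorem cloN_child_subset (d : String) (a : List (String × List String)) (x c : String)
    (he : expandable d a x = true) (hc : c ∈ kids a x) :
    ∀ y ∈ cloN d a c, y ∈ cloN d a x :=
  cloN_least d a c _ (cloN_closed d a x) (cloN_closed d a x x (mem_cloN_self d a x) he c hc)

-- the strict termination measure: |cloN c| < |cloN x| when x cannot be re-reached
theorem cloN_child_lt (d : String) (a : List (String × List String)) (x c : String)
    (he : expandable d a x = true) (hc : c ∈ kids a x) (hnc : x ∉ cloN d a c) :
    (cloN d a c).length < (cloN d a x).length := by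
  have hsub : ∀ y ∈ cloN d a c, y ∈ (cloN d a x).erase x := by
    intro y hy
    have hyx : y ∈ cloN d a x := cloN_child_subset d a x c he hc y hy
    have hne : y ≠ x := fun h => hnc (h ▸ hy)
    exact (List.mem_erase_of_ne hne).mpr hyx
  have h1 : (cloN d a c).length ≤ ((cloN d a x).erase x).length :=
    nodup_length_le _ _ (cloN_nodup d a c) hsub
  have h2 : ((cloN d a x).erase x).length = (cloN d a x).length - 1 :=
    List.length_erase_of_mem (mem_cloN_self d a x)
  have h3 : 0 < (cloN d a x).length := List.length_pos_of_mem (mem_cloN_self d a x)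
  omega

-- A terminates on Pre_: fuel above the measure of the visited node suffices
theorem pruneA_total (r : String) (d : String) (a : List (String × List String))
    (b0 : List String) (hpre : Pre_prune r d a b0) :
    ∀ f x b, x ∈ cloN d a r → (cloN d a x).length < f →
      ∃ b', pruneA d a f x b = some b' := by
  intro f
  induction f with
  | zero => intro x b _ hf; exact absurd hf (Nat.not_lt_zero _)
  | succ f ih =>
    intro x b hx hf
    have h1 : OneDash x := hpre.1 x hx
    obtain ⟨d1, r1, hsp⟩ : ∃ d1 r1, PySem.Str.split? x "-" = some [d1, r1] := by
      unfold OneDash at h1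
      cases hsp : PySem.Str.split? x "-" with
      | none => rw [hsp] at h1; simp at h1
      | some l =>
        rw [hsp] at h1; simp at h1
        match l, h1 with
        | [x, y], _ => exact ⟨x, y, rfl⟩
    simp only [pruneA]
    rw [hsp]
    simp only
    by_cases hd : d1 == d
    · rw [if_pos hd]; exact ⟨b ++ [x], rfl⟩
    · rw [if_neg hd]
      by_cases hc : (PySem.Dict.mk a).contains x
      · rw [if_pos hc]
        have he : expandable d a x = true := by
          unfold expandable; rw [hsp]; simp only
          rw [Bool.and_eq_true, bne_iff_ne]
          exact ⟨by simpa using hd, hc⟩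
        have hchild : ∀ c ∈ kids a x, c ∈ cloN d a r ∧ (cloN d a c).length < f := by
          intro c hcm
          have hcr : c ∈ cloN d a r := cloN_closed d a r x hx he c hcm
          have hlt := cloN_child_lt d a x c he hcm (hpre.2 x hx he c hcm)
          exact ⟨hcr, by omega⟩
        have inner : ∀ (cs : List String), (∀ c ∈ cs, c ∈ cloN d a r ∧ (cloN d a c).length < f) →
            ∀ bb, ∃ b1, cs.foldlM (fun b r2 => pruneA d a f r2 b) bb = some b1 := by
          intro cs
          induction cs with
          | nil => intro _ bb; exact ⟨bb, by rw [List.foldlM_nil]; rfl⟩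
          | cons c cs ihc =>
            intro hall bb
            obtain ⟨bm, hbm⟩ := ih c bb (hall c (by simp)).1 (hall c (by simp)).2
            obtain ⟨b1, hb1⟩ := ihc (fun y hy => hall y (by simp [hy])) bm
            refine ⟨b1, ?_⟩
            rw [List.foldlM_cons, hbm]
            exact hb1
        exact inner (kids a x) hchild b
      · rw [if_neg hc]; exact ⟨b, rfl⟩

-- MAIN SIMULATION: one successful A-call is one node visit plus its children on B's stack
theorem pruneA_to_pruneB (d : String) (a : List (String × List String)) :
    ∀ f r b b' s g v, pruneA d a f r b = some b' → pruneB d a g s b' = some v →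
      pruneB d a (bCost (maxChildren a) f + g) (r :: s) b = some v := by
  intro f
  induction f with
  | zero => intro r b b' s g v hA _; simp [pruneA] at hA
  | succ f ih =>
    intro r b b' s g v hA hB
    have hfuel : bCost (maxChildren a) (f+1) + g = (maxChildren a * bCost (maxChildren a) f + g) + 1 := by
      simp [bCost]; omega
    rw [hfuel]
    simp only [pruneA] at hA
    simp only [pruneB]
    cases hsp : PySem.Str.split? r "-" with
    | none => rw [hsp] at hA; simp at hA
    | some l =>
      rw [hsp] at hA
      match l with
      | [] => simp at hA
      | [x] => simp at hA
      | x :: y :: z :: t => simp at hA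
      | [d1, r1] =>
        simp only at hA ⊢
        by_cases hd : d1 == d
        · rw [if_pos hd] at hA ⊢
          simp at hA
          subst hA
          exact pruneB_mono d a g _ _ _ _ (by omega) hB
        · rw [if_neg hd] at hA ⊢
          by_cases hc : (PySem.Dict.mk a).contains r
          · rw [if_pos hc] at hA ⊢
            have hlen : ((PySem.Dict.mk a).getD r []).length ≤ maxChildren a := kids_length_le a r
            have inner : ∀ (cs : List String) (b0 b1 : List String),
                cs.foldlM (fun b r2 => pruneA d a f r2 b) b0 = some b1 →
                ∀ s' g' v', pruneB d a g' s' b1 = some v' →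
                  pruneB d a (cs.length * bCost (maxChildren a) f + g') (cs ++ s') b0 = some v' := by
              intro cs
              induction cs with
              | nil => intro b0 b1 hf s' g' v' hB'; rw [List.foldlM_nil] at hf; cases hf; simpa using hB'
              | cons c cs ihc =>
                intro b0 b1 hf s' g' v' hB'
                rw [List.foldlM_cons] at hf
                cases hstep : pruneA d a f c b0 with
                | none => rw [hstep] at hf; simp at hf
                | some bm =>
                  rw [hstep] at hf
                  rw [show ((some bm >>= fun b => List.foldlM (fun b r2 => pruneA d a f r2 b) b cs) = List.foldlM (fun b r2 => pruneA d a f r2 b) bm cs) from rfl] at hf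
                  have hrest := ihc bm b1 hf s' g' v' hB'
                  have := ih c b0 bm (cs ++ s') (cs.length * bCost (maxChildren a) f + g') v' hstep hrest
                  have harith : bCost (maxChildren a) f + (cs.length * bCost (maxChildren a) f + g')
                      = (c :: cs).length * bCost (maxChildren a) f + g' := by
                    simp only [List.length_cons]; ring
                  rw [harith] at this
                  simpa using this
            have := inner _ b b' hA s g v hB
            exact pruneB_mono d a _ _ _ _ _
              (Nat.add_le_add_right (Nat.mul_le_mul_right _ hlen) g) this
          · rw [if_neg hc] at hA ⊢
            simp at hA; subst hA
            exact pruneB_mono d a g _ _ _ _ (by omega) hB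

-- ===== VERDICT (by name: the statement is the Claim_ definition above) =====
theorem prune_spec : Claim_equal_prune := by
  intro r d a b _hdom hpre
  have hmeas : (cloN d a r).length < fuelA a := by
    have hsub : ∀ x ∈ cloN d a r, x ∈ r :: a.flatMap Prod.snd := by
      apply cloN_least
      · intro y _ _ c hc
        exact List.mem_cons_of_mem _ (kids_subset_flatMap a y c hc)
      · simp
    have := nodup_length_le _ _ (cloN_nodup d a r) hsub
    simp only [List.length_cons] at this
    unfold fuelA
    omega
  obtain ⟨b', hA⟩ := pruneA_total r d a b hpre (fuelA a) r b (mem_cloN_self d a r) hmeas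
  have hB : pruneB d a (bCost (maxChildren a) (fuelA a) + 1) [r] b = some b' :=
    pruneA_to_pruneB d a (fuelA a) r b b' [] 1 b' hA (by rfl)
  unfold Spec_prune prune prune_alt
  rw [hA, hB]
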